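-- pv_equiv track=rewrite | github.com/Saha5588/Primitive-types | Functions.py | student_check
-- ===== SOURCE A (Python) =====
-- def student_check(students_marks):
--
--     passing_marks = 50
--     student_of_the_year = ''
--     for students_name, marks in students_marks:
--         if marks > passing_marks:
--             passing_marks = marks
--             student_of_the_year = students_name
--         else:
--             pass
--     return(student_of_the_year, passing_marks)
-- ===== SOURCE B (Python) =====
-- def student_check(students_marks):
--     passing = [s for s in students_marks if s[1] > 50]
--     if not passing:
--         return ('', 50)
--     return max(passing, key=lambda s: s[1])
-- ===== Notes on version B (the rewrite author's own statement) =====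
-- stated objective: alternative
-- what changed: Replaces A's single running-max loop with mutable threshold state by two staged passes: filter the students with marks > 50, then take the builtin max by marks (first maximum wins, matching A's strict-> first-wins tie-break), with ('', 50) for an empty filtered list.
import Mathlib
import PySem

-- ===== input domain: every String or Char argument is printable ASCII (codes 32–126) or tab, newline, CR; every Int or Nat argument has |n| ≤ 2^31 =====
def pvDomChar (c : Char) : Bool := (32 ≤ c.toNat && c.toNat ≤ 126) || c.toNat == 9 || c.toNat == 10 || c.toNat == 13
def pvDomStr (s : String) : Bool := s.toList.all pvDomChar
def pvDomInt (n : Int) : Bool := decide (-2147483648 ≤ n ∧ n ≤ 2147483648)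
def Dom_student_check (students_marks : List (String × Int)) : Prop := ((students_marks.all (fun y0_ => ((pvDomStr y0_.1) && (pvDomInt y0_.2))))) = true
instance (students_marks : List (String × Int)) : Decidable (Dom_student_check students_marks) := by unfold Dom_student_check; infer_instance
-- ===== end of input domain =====

-- B replaces A's running-max loop with mutable threshold state by two staged passes:
-- filter students with marks > 50, then the builtin max by marks (alternative decomposition, not faster).


-- ===== PORT A =====
-- A's for-loop over (name, marks) with state (student_of_the_year, passing_marks)
def studentLoop : String × Int → List (String × Int) → String × Int
  | acc, [] => acc
  | (sn, pm), (n, m) :: t => if m > pm then studentLoop (n, m) t else studentLoop (sn, pm) t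

def student_check (students_marks : List (String × Int)) : String × Int :=
  studentLoop ("", 50) students_marks

-- ===== PORT B =====
-- passing = [s for s in students_marks if s[1] > 50]; ('', 50) if empty else max(passing, key=marks)
def student_check_alt (students_marks : List (String × Int)) : String × Int :=
  match PySem.List.max? (students_marks.filter (fun s => decide (s.2 > 50))) (fun s => s.2) with
  | none => ("", 50)
  | some s => s

-- ===== PRECONDITION & SPEC =====
def Spec_student_check (students_marks : List (String × Int)) (out : String × Int) : Prop := out = student_check_alt students_marks
instance (students_marks : List (String × Int)) (out : String × Int) : Decidable (Spec_student_check students_marks out) := by unfold Spec_student_check; infer_instance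

-- ===== CLAIM (what is proved, stated in full; the proofs are below) =====
def Claim_equal_student_check : Prop := ∀ (students_marks : List (String × Int)), Dom_student_check students_marks → Spec_student_check students_marks (student_check students_marks)

-- ===== LEMMAS AND PROOFS =====

-- the folding step of PySem.List.max? with key = marks (first maximum wins)
def maxStep (o : Option (String × Int)) (x : String × Int) : Option (String × Int) :=
  match o with
  | none => some x
  | some m => if m.2 < x.2 then some x else some m

theorem max?_eq_foldl_maxStep (l : List (String × Int)) :
    PySem.List.max? l (fun s => s.2) = l.foldl maxStep none := by
  unfold PySem.List.max?
  congr 1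
  funext acc x
  cases acc <;> rfl

-- invariant tying the max?-fold state over the filtered list to A's loop state
def LoopInv (o : Option (String × Int)) (p : String × Int) : Prop :=
  (o = none ∧ p = ("", 50)) ∨ (o = some p ∧ 50 < p.2)

theorem loop_rel (l : List (String × Int)) :
    ∀ o p, LoopInv o p →
      LoopInv ((l.filter (fun s => decide (s.2 > 50))).foldl maxStep o) (studentLoop p l) := by
  induction l with
  | nil => intro o p h; exact h
  | cons x t ih =>
    intro o p h
    obtain ⟨sn, pm⟩ := p
    obtain ⟨n, m⟩ := x
    by_cases hm : (50:Int) < m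
    · -- x passes the filter
      rcases h with ⟨ho, hp⟩ | ⟨ho, hp⟩
      · -- state empty: loop takes x (since pm = 50 < m), fold state becomes some x
        cases hp
        simp only [gt_iff_lt, hm, decide_true, List.filter_cons_of_pos, List.foldl,
          studentLoop, ho, maxStep]
        exact ih _ _ (Or.inr ⟨rfl, hm⟩)
      · -- state some (sn, pm), 50 < pm
        cases ho
        by_cases hc : pm < m
        · simp only [gt_iff_lt, hm, decide_true, List.filter_cons_of_pos, List.foldl,
            studentLoop, maxStep, if_pos hc]
          exact ih _ _ (Or.inr ⟨rfl, hm⟩)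
        · simp only [gt_iff_lt, hm, decide_true, List.filter_cons_of_pos, List.foldl,
            studentLoop, maxStep, if_neg hc]
          exact ih _ _ (Or.inr ⟨rfl, hp⟩)
    · -- x filtered out; loop also skips it because pm ≥ 50 ≥ m
      have hpm : (50:Int) ≤ pm := by
        rcases h with ⟨_, hp⟩ | ⟨_, hp⟩
        · cases hp; exact le_refl _
        · exact le_of_lt hp
      have hc : ¬ pm < m := by omega
      have hfil : List.filter (fun s : String × Int => decide (s.2 > 50)) ((n, m) :: t)
          = List.filter (fun s => decide (s.2 > 50)) t := by
        simp [hm]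
      rw [hfil]
      simp only [studentLoop, if_neg hc]
      exact ih o (sn, pm) h

-- ===== VERDICT (by name: the statement is the Claim_ definition above) =====
theorem student_check_spec : Claim_equal_student_check := by
  intro l _
  unfold Spec_student_check student_check student_check_alt
  rw [max?_eq_foldl_maxStep]
  have h := loop_rel l none ("", 50) (Or.inl ⟨rfl, rfl⟩)
  rcases h with ⟨ho, hp⟩ | ⟨ho, _⟩
  · rw [ho, hp]
  · rw [ho]
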